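-- pv_equiv track=rewrite | github.com/cormac-doyle/AdventOfCode | 2025/day10/p1.py | press_buttton
-- ===== SOURCE A (Python) =====
-- def press_buttton(curr_state, button):
--     next_ = list(curr_state)
--     for idx in button:
--         if next_[idx] == '.':
--             next_[idx] = '#'
--         else:
--             next_[idx] = '.'
--
--     return tuple(next_)
-- ===== SOURCE B (Python) =====
-- def press_buttton(curr_state, button):
--     n = len(curr_state)
--     counts = [0] * n
--     for idx in button:
--         counts[idx] += 1          # same IndexError / negative-index rules as list assignment
--     result = []
--     for s, c in zip(curr_state, counts):
--         if c == 0: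
--             result.append(s)
--         elif (s == '.') == (c % 2 == 1):
--             result.append('#')
--         else:
--             result.append('.')
--     return tuple(result)
-- ===== Notes on version B (the rewrite author's own statement) =====
-- stated objective: alternative
-- what changed: B replaces A's sequential in-place toggling per button press with building a per-index press-count array first and then one parity-driven pass that rebuilds the state, flipping '.'<->'#' exactly when a cell was pressed an odd number of times and leaving never-pressed cells untouched.
import Mathlib
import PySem

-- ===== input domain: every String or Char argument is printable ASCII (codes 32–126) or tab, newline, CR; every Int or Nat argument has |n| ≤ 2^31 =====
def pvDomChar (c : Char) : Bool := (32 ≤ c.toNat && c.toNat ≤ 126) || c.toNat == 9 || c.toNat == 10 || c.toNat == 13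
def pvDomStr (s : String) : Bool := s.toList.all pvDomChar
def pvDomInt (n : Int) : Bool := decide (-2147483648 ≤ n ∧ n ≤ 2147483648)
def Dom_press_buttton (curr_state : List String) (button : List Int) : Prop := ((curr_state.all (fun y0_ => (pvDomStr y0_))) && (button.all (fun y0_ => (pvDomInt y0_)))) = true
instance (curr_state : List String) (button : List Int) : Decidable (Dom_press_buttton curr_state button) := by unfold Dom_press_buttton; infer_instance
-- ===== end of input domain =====

-- B replaces A's sequential toggling with a per-index press-count table and one
-- parity-driven rebuilding pass (alternative decomposition, same cost).

-- ===== PORT A =====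
def press_buttton (curr_state : List String) (button : List Int) : List String :=
  button.foldl (fun next_ idx =>
    if PySem.List.pyGetD next_ idx "" = "." then
      PySem.List.pySetD next_ idx "#"
    else
      PySem.List.pySetD next_ idx ".") curr_state

-- ===== PORT B =====
def press_buttton_alt (curr_state : List String) (button : List Int) : List String :=
  let counts : List Int :=
    button.foldl (fun cs idx =>
      PySem.List.pySetD cs idx (PySem.List.pyGetD cs idx 0 + 1))
      (List.replicate curr_state.length (0 : Int))
  (curr_state.zip counts).map (fun p =>
    if p.2 = 0 then p.1
    else if decide (p.1 = ".") = decide (PySem.Int.mod p.2 2 = 1) then "#"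
    else ".")

-- ===== PRECONDITION & SPEC =====
-- Pre_ excludes exactly the inputs where some button index is out of range for
-- curr_state: there Python A raises IndexError (and B raises the same).
def Pre_press_buttton (curr_state : List String) (button : List Int) : Prop :=
  ∀ idx ∈ button, PySem.Raise.InRange curr_state.length idx
instance (curr_state : List String) (button : List Int) : Decidable (Pre_press_buttton curr_state button) := by unfold Pre_press_buttton; infer_instance

def pvWitness_press_buttton : List String × List Int := (["." , "#", "x"], [0, -1, 2, 0])

def Spec_press_buttton (curr_state : List String) (button : List Int) (out : List String) : Prop := out = press_buttton_alt curr_state button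
instance (curr_state : List String) (button : List Int) (out : List String) : Decidable (Spec_press_buttton curr_state button out) := by unfold Spec_press_buttton; infer_instance

-- ===== CLAIM (what is proved, stated in full; the proofs are below) =====
def Claim_equal_press_buttton : Prop := ∀ (curr_state : List String) (button : List Int), Dom_press_buttton curr_state button → Pre_press_buttton curr_state button → Spec_press_buttton curr_state button (press_buttton curr_state button)

-- ===== LEMMAS AND PROOFS =====

-- the Nat position Python list indexing reaches for an in-range index i
def pvNorm (n : Nat) (i : Int) : Nat := if 0 ≤ i then i.toNat else n - (-i).toNat

-- A's toggle of one cell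
def pvToggle (s : String) : String := if s = "." then "#" else "."

theorem pvNorm_lt {n : Nat} {i : Int} (h : PySem.Raise.InRange n i) : pvNorm n i < n := by
  unfold PySem.Raise.InRange at h
  unfold pvNorm
  split <;> omega

theorem pyIdx?_eq_norm {n : Nat} {i : Int} (h : PySem.Raise.InRange n i) :
    PySem.List.pyIdx? n i = some (pvNorm n i) := by
  unfold PySem.Raise.InRange at h
  unfold PySem.List.pyIdx? pvNorm
  split <;> split <;> first | rfl | omega

theorem pySetD_eq_set {α : Type} (xs : List α) {i : Int} (h : PySem.Raise.InRange xs.length i) (v : α) :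
    PySem.List.pySetD xs i v = xs.set (pvNorm xs.length i) v := by
  unfold PySem.List.pySetD PySem.List.pySet?
  rw [pyIdx?_eq_norm h]
  rfl

theorem pyGetD_eq_getElem {α : Type} (xs : List α) {i : Int} (h : PySem.Raise.InRange xs.length i) (d : α) :
    PySem.List.pyGetD xs i d = xs[pvNorm xs.length i]'(pvNorm_lt h) := by
  unfold PySem.List.pyGetD PySem.List.pyGet?
  rw [pyIdx?_eq_norm h]
  simp [pvNorm_lt h]

-- one A-step is a toggle-write at the normalized position
theorem stepA_eq (st : List String) {i : Int} (h : PySem.Raise.InRange st.length i) :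
    (if PySem.List.pyGetD st i "" = "." then PySem.List.pySetD st i "#"
     else PySem.List.pySetD st i ".")
    = st.set (pvNorm st.length i) (pvToggle (st[pvNorm st.length i]'(pvNorm_lt h))) := by
  rw [pyGetD_eq_getElem st h, pySetD_eq_set st h, pySetD_eq_set st h, pvToggle]
  split <;> simp_all

-- A's fold, element-wise: each cell is toggled once per matching button press
theorem foldA_getElem? (bs : List Int) (st : List String)
    (hin : ∀ i ∈ bs, PySem.Raise.InRange st.length i) (j : Nat) :
    (bs.foldl (fun next_ idx =>
      if PySem.List.pyGetD next_ idx "" = "." then PySem.List.pySetD next_ idx "#"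
      else PySem.List.pySetD next_ idx ".") st)[j]?
    = st[j]?.map (fun s => pvToggle^[bs.countP (fun i => decide (pvNorm st.length i = j))] s) := by
  induction bs generalizing st with
  | nil => simp
  | cons i bs ih =>
    have hi : PySem.Raise.InRange st.length i := hin i (by simp)
    have hk := pvNorm_lt hi
    simp only [List.foldl_cons]
    rw [stepA_eq st hi]
    have hlen : (st.set (pvNorm st.length i) (pvToggle (st[pvNorm st.length i]'hk))).length = st.length := by simp
    rw [ih _ (by rw [hlen]; exact fun x hx => hin x (by simp [hx])), hlen]
    rw [List.getElem?_set]
    by_cases hj : pvNorm st.length i = j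
    · subst hj
      simp [hk, Function.iterate_succ_apply]
    · simp [hj]

-- B's count fold, element-wise
theorem foldB_getElem? (bs : List Int) (cs : List Int)
    (hin : ∀ i ∈ bs, PySem.Raise.InRange cs.length i) (j : Nat) :
    (bs.foldl (fun cs idx =>
      PySem.List.pySetD cs idx (PySem.List.pyGetD cs idx 0 + 1)) cs)[j]?
    = cs[j]?.map (fun c => c + (bs.countP (fun i => decide (pvNorm cs.length i = j)) : Int)) := by
  induction bs generalizing cs with
  | nil => simp
  | cons i bs ih =>
    have hi : PySem.Raise.InRange cs.length i := hin i (by simp)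
    have hk := pvNorm_lt hi
    simp only [List.foldl_cons]
    rw [pyGetD_eq_getElem cs hi, pySetD_eq_set cs hi]
    have hlen : (cs.set (pvNorm cs.length i) (cs[pvNorm cs.length i]'hk + 1)).length = cs.length := by simp
    rw [ih _ (by rw [hlen]; exact fun x hx => hin x (by simp [hx])), hlen]
    rw [List.getElem?_set]
    by_cases hj : pvNorm cs.length i = j
    · subst hj
      simp only [hk, if_pos, List.getElem?_eq_getElem hk, Option.map_some,
        List.countP_cons, decide_eq_true_eq]
      push_cast
      ring_nf
    · simp only [if_neg hj, List.countP_cons, decide_eq_true_eq]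
      cases cs[j]? <;> simp

-- iterated toggling is the parity formula B uses
theorem toggle_iterate (c : Nat) (s : String) :
    pvToggle^[c] s = if c = 0 then s
      else if decide (s = ".") = decide (c % 2 = 1) then "#" else "." := by
  induction c generalizing s with
  | zero => simp
  | succ c ih =>
    rw [Function.iterate_succ_apply, ih]
    by_cases hs : s = "."
    · subst hs
      simp only [pvToggle]
      rcases Nat.eq_zero_or_pos c with hc | hc
      · subst hc; decide
      · have h2 : ("#" : String) ≠ "." := by decide
        simp only [if_neg (by omega : ¬ c = 0),
          if_neg (by omega : ¬ c + 1 = 0)]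
        have : (c + 1) % 2 = 1 ↔ ¬ c % 2 = 1 := by omega
        by_cases hp : c % 2 = 1 <;> simp [this, hp]
    · have ht : pvToggle s = "." := by simp [pvToggle, hs]
      rw [ht]
      rcases Nat.eq_zero_or_pos c with hc | hc
      · subst hc; simp [hs]
      · simp only [if_neg (by omega : ¬ c = 0), if_neg (by omega : ¬ c + 1 = 0),
          decide_eq_false hs]
        have : (c + 1) % 2 = 1 ↔ ¬ c % 2 = 1 := by omega
        by_cases hp : c % 2 = 1 <;> simp [this, hp]

-- ===== VERDICT (by name: the statement is the Claim_ definition above) =====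
theorem press_buttton_spec : Claim_equal_press_buttton := by
  intro curr_state button _ hpre
  unfold Spec_press_buttton press_buttton press_buttton_alt
  have hcounts := fun j => foldB_getElem? button (List.replicate curr_state.length (0 : Int))
    (by simpa using hpre) j
  set counts := button.foldl (fun cs idx =>
      PySem.List.pySetD cs idx (PySem.List.pyGetD cs idx 0 + 1))
      (List.replicate curr_state.length (0 : Int)) with hcdef
  simp only [List.length_replicate] at hcounts
  have hclen : counts.length = curr_state.length := by
    by_contra hne
    rcases Nat.lt_or_ge counts.length curr_state.length with hlt | hge
    · have := hcounts counts.length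
      simp [hlt] at this
    · have hgt : curr_state.length < counts.length := by omega
      have := hcounts curr_state.length
      simp [List.getElem?_eq_getElem hgt] at this
  have hA := fun j => foldA_getElem? button curr_state hpre j
  apply List.ext_getElem?
  intro j
  rw [hA j]
  by_cases hj : j < curr_state.length
  · have hjc : j < counts.length := by omega
    have hcj : counts[j] = (button.countP (fun i => decide (pvNorm curr_state.length i = j)) : Int) := by
      have := hcounts j
      rw [List.getElem?_eq_getElem hjc, List.getElem?_eq_getElem (by simpa using hj)] at this
      simpa using Option.some.inj this
    rw [List.getElem?_eq_getElem hj, List.getElem?_map]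
    rw [List.getElem?_eq_getElem (by simp [hclen]; omega : j < (curr_state.zip counts).length)]
    simp only [List.getElem_zip, Option.map_some, Option.some.injEq]
    rw [hcj, toggle_iterate]
    set c := button.countP (fun i => decide (pvNorm curr_state.length i = j)) with hc
    by_cases h0 : c = 0
    · simp [h0]
    · have hz : ¬ ((c : Int) = 0) := by exact_mod_cast h0
      simp only [if_neg h0, if_neg hz]
      have hm : PySem.Int.mod (c : Int) 2 = 1 ↔ c % 2 = 1 := by
        rw [show PySem.Int.mod (c : Int) 2 = ((c % 2 : Nat) : Int) from by exact_mod_cast PySem.Int.mod_natCast c 2]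
        exact_mod_cast Iff.rfl
      by_cases hp : c % 2 = 1 <;> by_cases hs : curr_state[j] = "." <;>
        simp [hm, hp, hs, pvToggle] <;> omega
  · rw [List.getElem?_eq_none (by simpa using Nat.le_of_not_lt hj)]
    rw [List.getElem?_eq_none]
    · simp
    · simp [hclen]; omega
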